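-- pv_equiv track=rewrite | github.com/quantum-programming/RoM-handbook | exputils/once/make_H_Amat_by_LCgraphs.py | LCgraph_orbit_H
-- ===== SOURCE A (Python) =====
-- from itertools import accumulate, product
-- from typing import Iterable, List, Set, Tuple
--
-- def LCgraph_orbit_H(n: int, A: List[int]) -> Set[Tuple[int, ...]]:
--     eye = [1 << i for i in range(n)]
--     XZ_tableau = eye + A
--     iterators = []
--     for i in range(n):
--         it = []
--         col_pairs = []
--         for d in range(3):
--             X = XZ_tableau[i]
--             Z = XZ_tableau[i + n]
--             if d % 3 == 1:
--                 X, Z = Z, X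
--             if d % 3 == 2:
--                 X, Z = Z ^ X, X
--             pair = (X, Z)
--             if pair not in col_pairs:
--                 it.append(d)
--                 col_pairs.append(pair)
--         iterators.append(it)
--
--     orbit = set()
--     for p in product(*iterators):
--         tableau = XZ_tableau.copy()
--         for i, d in enumerate(p):
--             if d % 3 == 1:
--                 tableau[i], tableau[i + n] = tableau[i + n], tableau[i]
--             if d % 3 == 2:
--                 tableau[i], tableau[i + n] = tableau[i + n] ^ tableau[i], tableau[i]
--         orbit.add(tuple(tableau))
--     return orbit
-- ===== SOURCE B (Python) =====
-- def LCgraph_orbit_H(n, A):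
--     # Layered breadth-first expansion: start from the base tableau and, for each
--     # qubit in turn, replace every partial tableau by its distinct local-Clifford
--     # variants at that qubit; no itertools.product, no precomputed choice table.
--     tabs = [[1 << i for i in range(n)] + list(A)]
--     for i in range(n):
--         step = []
--         for t in tabs:
--             x, z = t[i], t[i + n]
--             seen = []
--             for pair in ((x, z), (z, x), (z ^ x, x)):
--                 if pair not in seen:
--                     seen.append(pair)
--                     u = t.copy()
--                     u[i], u[i + n] = pair
--                     step.append(u)
--         tabs = step
--     return set(map(tuple, tabs))
-- ===== Notes on version B (the rewrite author's own statement) =====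
-- stated objective: alternative
-- what changed: B replaces A's two-phase scheme (precompute per-qubit choice index lists, then itertools.product with a copy-and-mutate pass over each full combination) by a layered breadth-first frontier expansion: one pass over qubits in which every partial tableau is replaced by its distinct local-Clifford variants at that qubit, deduplicating the three variants inline; no product, no choice table.
import Mathlib
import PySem

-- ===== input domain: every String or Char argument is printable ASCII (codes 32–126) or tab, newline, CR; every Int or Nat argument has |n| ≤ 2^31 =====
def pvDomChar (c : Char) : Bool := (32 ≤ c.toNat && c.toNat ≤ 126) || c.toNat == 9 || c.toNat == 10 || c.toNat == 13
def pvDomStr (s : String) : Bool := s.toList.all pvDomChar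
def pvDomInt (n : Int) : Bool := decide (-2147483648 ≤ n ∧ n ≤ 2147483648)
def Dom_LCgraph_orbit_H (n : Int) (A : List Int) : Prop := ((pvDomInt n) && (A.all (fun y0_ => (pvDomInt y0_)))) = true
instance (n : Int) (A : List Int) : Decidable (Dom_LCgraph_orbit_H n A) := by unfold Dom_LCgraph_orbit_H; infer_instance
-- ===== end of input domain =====

-- B replaces A's precomputed choice lists + itertools.product + per-combination tableau mutation
-- by a layered breadth-first frontier expansion over the qubits (alternative decomposition, same cost).

-- ===== PORT A =====
-- the X,Z update for one local-Clifford choice d (the two sequential 'if d % 3' blocks)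
def pvTr (d : Int) (b : Int × Int) : Int × Int :=
  let b1 := if PySem.Int.mod d 3 == 1 then (b.2, b.1) else b
  if PySem.Int.mod d 3 == 2 then (PySem.Int.bxor b1.2 b1.1, b1.1) else b1

-- the inner 'for d in range(3)' dedup loop of A (X, Z re-read from the tableau are constant)
def pvInner3 (x z : Int) : List Int × List (Int × Int) :=
  (PySem.List.pyRange 0 3 1).foldl (fun acc d =>
    let pair := pvTr d (x, z)
    if pair ∈ acc.2 then acc else (acc.1 ++ [d], acc.2 ++ [pair])) ([], [])

-- itertools.product(*iterators) in CPython order (last list fastest)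
def pvProduct {α : Type} : List (List α) → List (List α)
  | [] => [[]]
  | l :: ls => l.flatMap (fun x => (pvProduct ls).map (x :: ·))

-- one step of A's tableau-mutation loop: 'tableau[i], tableau[i+n] = …' (RHS read first, then written)
def pvStepA (n : Int) (t : List Int) (i d : Int) : List Int :=
  let t1 :=
    if PySem.Int.mod d 3 == 1 then
      let x := PySem.List.pyGetD t i 0
      let z := PySem.List.pyGetD t (i + n) 0
      (t.set i.toNat z).set (i + n).toNat x
    else t
  if PySem.Int.mod d 3 == 2 then
    let x := PySem.List.pyGetD t1 i 0
    let z := PySem.List.pyGetD t1 (i + n) 0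
    (t1.set i.toNat (PySem.Int.bxor z x)).set (i + n).toNat x
  else t1

def LCgraph_orbit_H (n : Int) (A : List Int) : List (List Int) :=
  let eye := (PySem.List.pyRange 0 n 1).map (fun i => (1 : Int) <<< i.toNat)
  let tab := eye ++ A
  let iterators := (PySem.List.pyRange 0 n 1).foldl (fun its i =>
    its ++ [(pvInner3 (PySem.List.pyGetD tab i 0) (PySem.List.pyGetD tab (i + n) 0)).1]) []
  (pvProduct iterators).foldl (fun orbit p =>
    let tableau := (PySem.List.enumerate p 0).foldl (fun t id_ => pvStepA n t id_.1 id_.2) tab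
    PySem.Set.add orbit tableau) PySem.Set.empty

-- ===== PORT B =====
-- one tableau's expansion at qubit i: the dedup'd three-variant loop, appending seen and step in lockstep
-- ('u[i], u[i+n] = pair' ported with .set at i.toNat / (i+n).toNat: i ranges over range(n), so both are nonnegative)
def pvExpand (n : Int) (i : Int) (t : List Int) : List (List Int) :=
  let x := PySem.List.pyGetD t i 0
  let z := PySem.List.pyGetD t (i + n) 0
  (([(x, z), (z, x), (PySem.Int.bxor z x, x)].foldl
      (fun (acc : List (Int × Int) × List (List Int)) pr =>
        if pr ∈ acc.1 then acc
        else (acc.1 ++ [pr], acc.2 ++ [(t.set i.toNat pr.1).set (i + n).toNat pr.2]))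
      ([], []))).2

def LCgraph_orbit_H_alt (n : Int) (A : List Int) : List (List Int) :=
  let base := (PySem.List.pyRange 0 n 1).map (fun i => (1 : Int) <<< i.toNat) ++ A
  let tabs := (PySem.List.pyRange 0 n 1).foldl
    (fun tabs i => tabs.foldl (fun step t => step ++ pvExpand n i t) []) [base]
  PySem.Set.ofList tabs

-- ===== PRECONDITION & SPEC =====
-- Pre_ excludes only the inputs where A raises IndexError (n > len(A): XZ_tableau[i+n] out of range).
def Pre_LCgraph_orbit_H (n : Int) (A : List Int) : Prop := n ≤ (A.length : Int)
instance (n : Int) (A : List Int) : Decidable (Pre_LCgraph_orbit_H n A) := by unfold Pre_LCgraph_orbit_H; infer_instance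

def pvWitness_LCgraph_orbit_H : Int × List Int := (2, [3, 1])

def Spec_LCgraph_orbit_H (n : Int) (A : List Int) (out : List (List Int)) : Prop := out = LCgraph_orbit_H_alt n A
instance (n : Int) (A : List Int) (out : List (List Int)) : Decidable (Spec_LCgraph_orbit_H n A out) := by unfold Spec_LCgraph_orbit_H; infer_instance

-- ===== CLAIM (what is proved, stated in full; the proofs are below) =====
def Claim_equal_LCgraph_orbit_H : Prop := ∀ (n : Int) (A : List Int), Dom_LCgraph_orbit_H n A → Pre_LCgraph_orbit_H n A → Spec_LCgraph_orbit_H n A (LCgraph_orbit_H n A)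

-- ===== LEMMAS AND PROOFS =====

-- the deduplicated (X,Z) pairs of one column, in first-seen order (proof-side characterisation)
def pvOpts (x z : Int) : List (Int × Int) :=
  [(x, z), (z, x), (PySem.Int.bxor z x, x)].foldl
    (fun o pr => if pr ∈ o then o else o ++ [pr]) []

-- list surgery at a known position
theorem pvGetD_at_append {α : Type} (L r : List α) (x d : α) :
    (L ++ x :: r).getD L.length d = x := by
  induction L with
  | nil => rfl
  | cons a L ih => simpa using ih

theorem pvSet_at_append {α : Type} (L r : List α) (x y : α) :
    (L ++ x :: r).set L.length y = L ++ y :: r := by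
  induction L with
  | nil => rfl
  | cons a L ih => simpa using ih

theorem pvOpts_eq (x z : Int) :
    pvOpts x z = (pvInner3 x z).1.map (fun d => pvTr d (x, z)) := by
  have hr : PySem.List.pyRange 0 3 1 = [0, 1, 2] := by decide
  simp only [pvOpts, pvInner3, hr, List.foldl, pvTr,
    show (PySem.Int.mod 0 3 == (1:Int)) = false by decide,
    show (PySem.Int.mod 0 3 == (2:Int)) = false by decide,
    show (PySem.Int.mod 1 3 == (1:Int)) = true by decide,
    show (PySem.Int.mod 1 3 == (2:Int)) = false by decide,
    show (PySem.Int.mod 2 3 == (1:Int)) = false by decide,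
    show (PySem.Int.mod 2 3 == (2:Int)) = true by decide,
    if_true, if_false, Bool.false_eq_true]
  split_ifs <;> try rfl

theorem pvGet1 {α : Type} (u Xs v Zs w : List α) (x z : α) (dflt : α) :
    (u ++ (x :: Xs) ++ v ++ (z :: Zs) ++ w).getD u.length dflt = x := by
  have e1 : u ++ (x :: Xs) ++ v ++ (z :: Zs) ++ w = u ++ x :: (Xs ++ v ++ (z :: Zs) ++ w) := by
    simp [List.append_assoc]
  rw [e1, pvGetD_at_append]

theorem pvGet2 {α : Type} (u Xs v Zs w : List α) (x z : α) (dflt : α) :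
    (u ++ (x :: Xs) ++ v ++ (z :: Zs) ++ w).getD (u.length + (1 + Xs.length + v.length)) dflt = z := by
  have e2 : u ++ (x :: Xs) ++ v ++ (z :: Zs) ++ w = (u ++ x :: (Xs ++ v)) ++ z :: (Zs ++ w) := by
    simp [List.append_assoc]
  have hlen : (u ++ x :: (Xs ++ v)).length = u.length + (1 + Xs.length + v.length) := by
    simp; omega
  rw [e2, ← hlen, pvGetD_at_append]

theorem pvSet2 {α : Type} (u Xs v Zs w : List α) (x z a b : α) :
    (((u ++ (x :: Xs) ++ v ++ (z :: Zs) ++ w).set u.length a).set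
        (u.length + (1 + Xs.length + v.length)) b)
      = u ++ (a :: Xs) ++ v ++ (b :: Zs) ++ w := by
  have e1 : u ++ (x :: Xs) ++ v ++ (z :: Zs) ++ w = u ++ x :: (Xs ++ v ++ (z :: Zs) ++ w) := by
    simp [List.append_assoc]
  rw [e1, pvSet_at_append]
  have e2 : u ++ a :: (Xs ++ v ++ (z :: Zs) ++ w) = (u ++ a :: (Xs ++ v)) ++ z :: (Zs ++ w) := by
    simp [List.append_assoc]
  have hlen : (u ++ a :: (Xs ++ v)).length = u.length + (1 + Xs.length + v.length) := by
    simp; omega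
  rw [e2, ← hlen, pvSet_at_append]
  simp [List.append_assoc]

theorem pvStepA_eq (N : Nat) (u Xs v Zs w : List Int) (x z d : Int)
    (hN : 1 + Xs.length + v.length = N) :
    pvStepA (N : Int) (u ++ (x :: Xs) ++ v ++ (z :: Zs) ++ w) (u.length : Int) d
      = u ++ ((pvTr d (x, z)).1 :: Xs) ++ v ++ ((pvTr d (x, z)).2 :: Zs) ++ w := by
  have hi : ((u.length : Int)).toNat = u.length := by omega
  have hiN : ((u.length : Int) + (N : Int)).toNat = u.length + (1 + Xs.length + v.length) := by omega
  have hg1 : PySem.List.pyGetD (u ++ (x :: Xs) ++ v ++ (z :: Zs) ++ w) (u.length : Int) 0 = x := by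
    rw [PySem.List.pyGetD_natCast, pvGet1]
  have hg2 : PySem.List.pyGetD (u ++ (x :: Xs) ++ v ++ (z :: Zs) ++ w) ((u.length : Int) + (N : Int)) 0 = z := by
    have : ((u.length : Int) + (N : Int)) = ((u.length + (1 + Xs.length + v.length) : Nat) : Int) := by omega
    rw [this, PySem.List.pyGetD_natCast, pvGet2]
  by_cases h1 : PySem.Int.mod d 3 = 1 <;> by_cases h2 : PySem.Int.mod d 3 = 2
  · omega
  all_goals {
    first
      | (have c1 : (PySem.Int.mod d 3 == 1) = true := beq_iff_eq.mpr h1)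
      | (have c1 : (PySem.Int.mod d 3 == 1) = false := beq_eq_false_iff_ne.mpr h1)
    first
      | (have c2 : (PySem.Int.mod d 3 == 2) = true := beq_iff_eq.mpr h2)
      | (have c2 : (PySem.Int.mod d 3 == 2) = false := beq_eq_false_iff_ne.mpr h2)
    simp only [pvStepA, pvTr, c1, c2, Bool.false_eq_true, if_false, reduceIte]
    try rw [hg1, hg2, hi, hiN, pvSet2]
  }

theorem pvLoop (N : Nat) (p : List Int) : ∀ (u Xs v Zs w : List Int),
    Xs.length = p.length → Zs.length = p.length → p.length + v.length = N →
    ((PySem.List.enumerate p (u.length : Int)).foldl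
        (fun t id_ => pvStepA (N : Int) t id_.1 id_.2) (u ++ Xs ++ v ++ Zs ++ w))
      = u ++ (List.zipWith pvTr p (Xs.zip Zs)).map Prod.fst ++ v
          ++ (List.zipWith pvTr p (Xs.zip Zs)).map Prod.snd ++ w := by
  induction p with
  | nil =>
    intro u Xs v Zs w hX hZ hv
    cases Xs with
    | cons a b => simp at hX
    | nil =>
      cases Zs with
      | cons a b => simp at hZ
      | nil => simp [PySem.List.enumerate_nil]
  | cons d p ih =>
    intro u Xs v Zs w hX hZ hv
    cases Xs with
    | nil => simp at hX
    | cons x Xs =>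
      cases Zs with
      | nil => simp at hZ
      | cons z Zs =>
        rw [PySem.List.enumerate_cons]
        simp only [List.foldl_cons]
        rw [pvStepA_eq N u Xs v Zs w x z d (by simp at hX hv ⊢; omega)]
        have e : u ++ ((pvTr d (x, z)).1 :: Xs) ++ v ++ ((pvTr d (x, z)).2 :: Zs) ++ w
            = (u ++ [(pvTr d (x, z)).1]) ++ Xs ++ (v ++ [(pvTr d (x, z)).2]) ++ Zs ++ w := by
          simp
        have hs : ((u.length : Int) + 1) = (((u ++ [(pvTr d (x, z)).1]).length : Int)) := by
          simp
        rw [e, hs, ih (u ++ [(pvTr d (x, z)).1]) Xs (v ++ [(pvTr d (x, z)).2]) Zs w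
          (by simp at hX ⊢; omega) (by simp at hZ ⊢; omega) (by simp at hv ⊢; omega)]
        simp [List.append_assoc]

-- product over per-qubit transformed lists = transformed product over the d-lists
theorem pvProduct_map_zip {α β γ : Type} (bs : List β) (G : β → List γ) (f : γ → β → α) :
    pvProduct (bs.map (fun b => (G b).map (fun d => f d b)))
      = (pvProduct (bs.map G)).map (fun p => List.zipWith f p bs) := by
  induction bs with
  | nil => simp [pvProduct]
  | cons b bs ih => simp [pvProduct, ih, List.flatMap_map, List.map_flatMap, List.map_map, Function.comp_def]

theorem pvProduct_length {α : Type} (ls : List (List α)) (p : List α) (hp : p ∈ pvProduct ls) :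
    p.length = ls.length := by
  induction ls generalizing p with
  | nil => simp [pvProduct] at hp; simp [hp]
  | cons l ls ih =>
    simp only [pvProduct, List.mem_flatMap, List.mem_map] at hp
    obtain ⟨x, _, q, hq, rfl⟩ := hp
    simp [ih q hq]

-- the per-qubit base pairs (X_i, Z_i) = (1 << i, A[i])
def pvBs (N : Nat) (A : List Int) : List (Int × Int) :=
  (List.range N).map (fun k : Nat => ((1:Int) <<< (k:Int), A.getD k 0))

theorem pvTabGet1 (A : List Int) (N k : Nat) (hk : k < N) :
    PySem.List.pyGetD (((List.range N).map (fun j : Nat => (1:Int) <<< (j:Int))) ++ A) ((k : Nat) : Int) 0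
      = (1:Int) <<< (k:Int) := by
  rw [PySem.List.pyGetD_natCast]
  have hlen : ((List.range N).map (fun j : Nat => (1:Int) <<< (j:Int))).length = N := by simp
  rw [List.getD_eq_getElem?_getD, List.getElem?_append_left (by omega)]
  simp [hk]

theorem pvTabGet2 (A : List Int) (N k : Nat) (hk : k < N) (hNA : N ≤ A.length) :
    PySem.List.pyGetD (((List.range N).map (fun j : Nat => (1:Int) <<< (j:Int))) ++ A) (((k : Nat) : Int) + ((N : Nat) : Int)) 0
      = A.getD k 0 := by
  have hc : (((k : Nat) : Int) + ((N : Nat) : Int)) = (((k + N : Nat) : Nat) : Int) := by push_cast; ring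
  rw [hc, PySem.List.pyGetD_natCast]
  have hlen : ((List.range N).map (fun j : Nat => (1:Int) <<< (j:Int))).length = N := by simp
  rw [List.getD_eq_getElem?_getD, List.getElem?_append_right (by omega)]
  simp [hlen, List.getD_eq_getElem?_getD]

-- A normalised: a fold of Set.add over the product of the per-column d-lists
theorem pvA_norm (n : Int) (A : List Int) (N : Nat) (hn : n = (N:Int)) (hNA : N ≤ A.length) :
    LCgraph_orbit_H n A
      = (pvProduct ((pvBs N A).map (fun b => (pvInner3 b.1 b.2).1))).foldl
          (fun orb p => PySem.Set.add orb
            ((PySem.List.enumerate p 0).foldl (fun t id_ => pvStepA n t id_.1 id_.2)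
              (((List.range N).map (fun k : Nat => (1:Int) <<< (k:Int))) ++ A)))
          PySem.Set.empty := by
  have hr : PySem.List.pyRange 0 n 1 = (List.range N).map (fun k => ((k : Nat) : Int)) := by
    rw [PySem.List.pyRange_one]
    simp [hn]
  simp only [LCgraph_orbit_H, hr]
  have heye : ((List.range N).map (fun k => ((k : Nat) : Int))).map (fun i => (1:Int) <<< i.toNat)
      = (List.range N).map (fun k : Nat => (1:Int) <<< (k:Int)) := by
    simp [List.map_map, Function.comp_def]
  rw [heye]
  rw [PySem.List.foldl_append_singleton_eq_map]
  have hits : ((List.range N).map (fun k => ((k : Nat) : Int))).map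
        (fun i => (pvInner3
          (PySem.List.pyGetD (((List.range N).map (fun k : Nat => (1:Int) <<< (k:Int))) ++ A) i 0)
          (PySem.List.pyGetD (((List.range N).map (fun k : Nat => (1:Int) <<< (k:Int))) ++ A) (i + n) 0)).1)
      = (pvBs N A).map (fun b => (pvInner3 b.1 b.2).1) := by
    rw [List.map_map, pvBs, List.map_map]
    apply List.map_congr_left
    intro k hk
    simp only [Function.comp_apply]
    rw [hn, pvTabGet1 A N k (List.mem_range.mp hk), pvTabGet2 A N k (List.mem_range.mp hk) hNA]
  rw [hits]
  simp

theorem pvBs_eq_zip (N : Nat) (A : List Int) (hNA : N ≤ A.length) :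
    ((List.range N).map (fun k : Nat => (1:Int) <<< (k:Int))).zip (A.take N) = pvBs N A := by
  apply List.ext_getElem
  · simp [pvBs]
    omega
  · intro i h1 h2
    have hi : i < N := by simp [pvBs] at h2; omega
    have hiA : i < A.length := by omega
    simp [pvBs, List.getElem_zip, List.getElem_take, List.getD_eq_getElem?_getD, hiA]

-- A = Set.ofList of the assembled product list (the common normal form)
theorem pvA_prod (n : Int) (A : List Int) (N : Nat) (hn : n = (N:Int)) (hNA : N ≤ A.length) :
    LCgraph_orbit_H n A
      = PySem.Set.ofList
          ((pvProduct ((pvBs N A).map (fun b => pvOpts b.1 b.2))).map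
            (fun e => e.map Prod.fst ++ e.map Prod.snd ++ A.drop N)) := by
  rw [pvA_norm n A N hn hNA]
  have hopts : (pvBs N A).map (fun b => pvOpts b.1 b.2)
      = (pvBs N A).map (fun b =>
          ((pvInner3 b.1 b.2).1).map (fun d => pvTr d (b.1, b.2))) := by
    apply List.map_congr_left
    intro b _
    rw [pvOpts_eq]
  rw [hopts,
    pvProduct_map_zip (pvBs N A) (fun b => (pvInner3 b.1 b.2).1)
      (fun d b => pvTr d (b.1, b.2)),
    PySem.Set.ofList_eq_foldl, List.foldl_map, List.foldl_map]
  apply PySem.List.foldl_congr_mem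
  intro acc p hp
  have hlen : p.length = N := by
    have h := pvProduct_length _ p hp
    simpa [pvBs] using h
  congr 1
  have hX : ((List.range N).map (fun k : Nat => (1:Int) <<< (k:Int))).length = p.length := by
    simp [hlen]
  have hZ : (A.take N).length = p.length := by
    simp [hlen]
    omega
  have hv : p.length + ([] : List Int).length = N := by simp [hlen]
  have hloop := pvLoop N p []
    ((List.range N).map (fun k : Nat => (1:Int) <<< (k:Int))) []
    (A.take N) (A.drop N) hX hZ hv
  simp only [List.length_nil, Nat.cast_zero, List.nil_append, List.append_nil] at hloop
  rw [hn]
  have htab : (List.range N).map (fun k : Nat => (1:Int) <<< (k:Int)) ++ A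
      = ((List.range N).map (fun k : Nat => (1:Int) <<< (k:Int))) ++ (A.take N) ++ (A.drop N) := by
    simp
  rw [htab, hloop, pvBs_eq_zip N A hNA]

-- B-side: the lockstep dedup fold produces exactly (pvOpts x z).map f
theorem pvLockstep (f : Int × Int → List Int) (l : List (Int × Int)) : ∀ (s : List (Int × Int)),
    (l.foldl (fun (acc : List (Int × Int) × List (List Int)) pr =>
        if pr ∈ acc.1 then acc else (acc.1 ++ [pr], acc.2 ++ [f pr])) (s, s.map f))
      = (l.foldl (fun o pr => if pr ∈ o then o else o ++ [pr]) s,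
         (l.foldl (fun o pr => if pr ∈ o then o else o ++ [pr]) s).map f) := by
  induction l with
  | nil => intro s; rfl
  | cons pr l ih =>
    intro s
    simp only [List.foldl_cons]
    by_cases h : pr ∈ s
    · simp only [if_pos h]
      exact ih s
    · simp only [if_neg h]
      have : (s ++ [pr]).map f = s.map f ++ [f pr] := by simp
      rw [← this]
      exact ih (s ++ [pr])

theorem pvExpand_eq (n i : Int) (t : List Int) :
    pvExpand n i t
      = (pvOpts (PySem.List.pyGetD t i 0) (PySem.List.pyGetD t (i + n) 0)).map
          (fun pr => (t.set i.toNat pr.1).set (i + n).toNat pr.2) := by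
  simp only [pvExpand, pvOpts]
  rw [show (([] : List (Int × Int)), ([] : List (List Int)))
        = (([] : List (Int × Int)), ([] : List (Int × Int)).map
            (fun pr => (t.set i.toNat pr.1).set (i + n).toNat pr.2)) from rfl,
      pvLockstep]

-- expanding one tableau of the canonical shape at the frontier position
theorem pvExpand_shape (N : Nat) (u Xs v Zs w : List Int) (x z : Int)
    (hv : v.length = u.length) (hN : 1 + Xs.length + v.length = N) :
    pvExpand (N : Int) ((u.length : Int)) (u ++ (x :: Xs) ++ v ++ (z :: Zs) ++ w)
      = (pvOpts x z).map (fun pr => u ++ (pr.1 :: Xs) ++ v ++ (pr.2 :: Zs) ++ w) := by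
  rw [pvExpand_eq]
  have hg1 : PySem.List.pyGetD (u ++ (x :: Xs) ++ v ++ (z :: Zs) ++ w) (u.length : Int) 0 = x := by
    rw [PySem.List.pyGetD_natCast, pvGet1]
  have hg2 : PySem.List.pyGetD (u ++ (x :: Xs) ++ v ++ (z :: Zs) ++ w) ((u.length : Int) + (N : Int)) 0 = z := by
    have : ((u.length : Int) + (N : Int)) = ((u.length + (1 + Xs.length + v.length) : Nat) : Int) := by omega
    rw [this, PySem.List.pyGetD_natCast, pvGet2]
  rw [hg1, hg2]
  apply List.map_congr_left
  intro pr _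
  have hi : ((u.length : Int)).toNat = u.length := by omega
  have hiN : ((u.length : Int) + (N : Int)).toNat = u.length + (1 + Xs.length + v.length) := by omega
  rw [hi, hiN, pvSet2]

-- the layered frontier invariant: folding the expansion over qubits u..u+|Xs| turns every
-- partial combination c ∈ C into all its completions by the remaining columns' options
theorem pvBFS (w : List Int) : ∀ (Xs Zs : List Int) (u : Nat) (N : Int)
    (C : List (List (Int × Int))),
    Zs.length = Xs.length → N = (u : Int) + (Xs.length : Int) →
    (∀ c ∈ C, c.length = u) →
    (((List.range' u Xs.length).map (fun k : Nat => (k : Int))).foldl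
        (fun tabs i => tabs.foldl (fun step t => step ++ pvExpand N i t) [])
        (C.map (fun c => c.map Prod.fst ++ Xs ++ c.map Prod.snd ++ Zs ++ w)))
      = (C.flatMap (fun c =>
            (pvProduct ((Xs.zip Zs).map (fun b => pvOpts b.1 b.2))).map (fun e => c ++ e))).map
          (fun c => c.map Prod.fst ++ c.map Prod.snd ++ w) := by
  intro Xs
  induction Xs with
  | nil =>
    intro Zs u N C hlen hN hC
    cases Zs with
    | cons a b => simp at hlen
    | nil =>
      simp [pvProduct]
  | cons x Xs ih =>
    intro Zs u N C hlen hN hC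
    cases Zs with
    | nil => simp at hlen
    | cons z Zs =>
      simp only [List.length_cons, List.range'_succ, List.map_cons, List.foldl_cons]
      have hstep : (C.map (fun c => c.map Prod.fst ++ (x :: Xs) ++ c.map Prod.snd ++ (z :: Zs) ++ w)).foldl
            (fun step t => step ++ pvExpand N (u : Int) t) []
          = (C.flatMap (fun c => (pvOpts x z).map (fun pr => c ++ [pr]))).map
              (fun c => c.map Prod.fst ++ Xs ++ c.map Prod.snd ++ Zs ++ w) := by
        rw [PySem.List.foldl_append_eq_flatMap, List.nil_append, List.flatMap_map]
        rw [List.map_flatMap]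
        apply List.flatMap_congr
        intro c hc
        have hcu : c.length = u := hC c hc
        have hNn : N = ((1 + Xs.length + (c.map Prod.snd).length : Nat) : Int) := by
          simp [hcu] at hN ⊢
          omega
        have := pvExpand_shape (1 + Xs.length + (c.map Prod.snd).length)
          (c.map Prod.fst) Xs (c.map Prod.snd) Zs w x z (by simp [hcu]) rfl
        rw [hNn]
        rw [show ((u : Nat) : Int) = ((c.map Prod.fst).length : Int) by simp [hcu]]
        rw [this, List.map_map]
        apply List.map_congr_left
        intro pr _
        simp [List.append_assoc]
      rw [hstep]
      have hC' : ∀ c ∈ C.flatMap (fun c => (pvOpts x z).map (fun pr => c ++ [pr])),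
          c.length = u + 1 := by
        intro c hc
        simp only [List.mem_flatMap, List.mem_map] at hc
        obtain ⟨c0, hc0, pr, _, rfl⟩ := hc
        simp [hC c0 hc0]
      rw [ih Zs (u + 1) N _ (by simpa using hlen) (by simp at hN ⊢; omega) hC']
      congr 1
      rw [List.flatMap_assoc]
      apply List.flatMap_congr
      intro c _
      simp only [List.zip_cons_cons, List.map_cons, pvProduct, List.map_flatMap,
        List.flatMap_map, List.map_map]
      apply List.flatMap_congr
      intro pr _
      apply List.map_congr_left
      intro e _
      simp

-- B = Set.ofList of the same assembled product list
theorem pvB_prod (n : Int) (A : List Int) (N : Nat) (hn : n = (N:Int)) (hNA : N ≤ A.length) :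
    LCgraph_orbit_H_alt n A
      = PySem.Set.ofList
          ((pvProduct ((pvBs N A).map (fun b => pvOpts b.1 b.2))).map
            (fun e => e.map Prod.fst ++ e.map Prod.snd ++ A.drop N)) := by
  have hr : PySem.List.pyRange 0 n 1 = (List.range' 0 N).map (fun k => ((k : Nat) : Int)) := by
    rw [PySem.List.pyRange_one]
    simp [hn, List.range_eq_range']
  simp only [LCgraph_orbit_H_alt, hr]
  have heye : ((List.range' 0 N).map (fun k => ((k : Nat) : Int))).map (fun i => (1:Int) <<< i.toNat)
      = (List.range N).map (fun k : Nat => (1:Int) <<< (k:Int)) := by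
    simp [List.map_map, Function.comp_def, List.range_eq_range']
  rw [heye]
  have hbase : (List.range N).map (fun k : Nat => (1:Int) <<< (k:Int)) ++ A
      = ([] : List (Int × Int)).map Prod.fst
          ++ ((List.range N).map (fun k : Nat => (1:Int) <<< (k:Int)))
          ++ ([] : List (Int × Int)).map Prod.snd ++ (A.take N) ++ (A.drop N) := by
    simp
  have hbfs := pvBFS (A.drop N)
    ((List.range N).map (fun k : Nat => (1:Int) <<< (k:Int))) (A.take N) 0 n [[]]
    (by simp; omega) (by simp [hn]) (by simp)
  simp only [List.length_map, List.length_range] at hbfs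
  rw [hbase, show [([] : List (Int × Int)).map Prod.fst
          ++ ((List.range N).map (fun k : Nat => (1:Int) <<< (k:Int)))
          ++ ([] : List (Int × Int)).map Prod.snd ++ (A.take N) ++ (A.drop N)]
      = ([([] : List (Int × Int))]).map (fun c => c.map Prod.fst
          ++ ((List.range N).map (fun k : Nat => (1:Int) <<< (k:Int)))
          ++ c.map Prod.snd ++ (A.take N) ++ (A.drop N)) from rfl]
  rw [hbfs, pvBs_eq_zip N A hNA]
  simp

-- ===== VERDICT (by name: the statement is the Claim_ definition above) =====
theorem LCgraph_orbit_H_spec : Claim_equal_LCgraph_orbit_H := by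
  intro n A _ hPre
  unfold Spec_LCgraph_orbit_H
  unfold Pre_LCgraph_orbit_H at hPre
  by_cases hn : n ≤ 0
  · have hr : PySem.List.pyRange 0 n 1 = [] := PySem.List.pyRange_one_eq_nil hn
    simp [LCgraph_orbit_H, LCgraph_orbit_H_alt, hr, pvProduct, PySem.List.enumerate_nil,
      PySem.Set.ofList, PySem.Set.add, PySem.Set.empty]
  · replace hn : 0 < n := by omega
    have hnN : n = (n.toNat : Int) := by omega
    have hNA : n.toNat ≤ A.length := by omega
    rw [pvA_prod n A n.toNat hnN hNA, pvB_prod n A n.toNat hnN hNA]
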